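-- pv_equiv track=rewrite | github.com/eadydb/plugins | skills/managing-specifications/scripts/analyze-project-context.py | infer_architecture_pattern
-- ===== SOURCE A (Python) =====
-- def infer_architecture_pattern(structure):
--     """Infer architecture pattern from directory structure"""
--     source_dirs = structure.get('source_dirs', [])
--
--     patterns = []
--     if any('model' in d.lower() for d in source_dirs):
--         patterns.append("Likely uses MVC or layered architecture")
--     if any('controller' in d.lower() for d in source_dirs):
--         patterns.append("Detected Controller layer")
--     if any('service' in d.lower() for d in source_dirs):
--         patterns.append("Detected Service layer")
--     if any('repository' in d.lower() or 'dao' in d.lower() for d in source_dirs):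
--         patterns.append("Detected Repository/DAO layer")
--
--     if patterns:
--         return '\n'.join(f"- {p}" for p in patterns)
--     return "- [To be analyzed] Please add architecture patterns based on code structure"
-- ===== SOURCE B (Python) =====
-- def infer_architecture_pattern(structure):
--     """Infer architecture pattern from directory structure (single-pass flag accumulation)"""
--     has_model = has_controller = has_service = has_repo = False
--     for d in structure.get('source_dirs', []):
--         dl = d.lower()
--         has_model = has_model or 'model' in dl
--         has_controller = has_controller or 'controller' in dl
--         has_service = has_service or 'service' in dl
--         has_repo = has_repo or 'repository' in dl or 'dao' in dl
--     msgs = []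
--     if has_model:
--         msgs.append("- Likely uses MVC or layered architecture")
--     if has_controller:
--         msgs.append("- Detected Controller layer")
--     if has_service:
--         msgs.append("- Detected Service layer")
--     if has_repo:
--         msgs.append("- Detected Repository/DAO layer")
--     if msgs:
--         return '\n'.join(msgs)
--     return "- [To be analyzed] Please add architecture patterns based on code structure"
-- ===== Notes on version B (the rewrite author's own statement) =====
-- stated objective: alternative
-- what changed: Replaces four independent any()-scans over source_dirs (each lowercasing every directory again) with one pass that lowercases each directory once and accumulates four booleans, then emits the already-prefixed messages in the fixed order.
import Mathlib
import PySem

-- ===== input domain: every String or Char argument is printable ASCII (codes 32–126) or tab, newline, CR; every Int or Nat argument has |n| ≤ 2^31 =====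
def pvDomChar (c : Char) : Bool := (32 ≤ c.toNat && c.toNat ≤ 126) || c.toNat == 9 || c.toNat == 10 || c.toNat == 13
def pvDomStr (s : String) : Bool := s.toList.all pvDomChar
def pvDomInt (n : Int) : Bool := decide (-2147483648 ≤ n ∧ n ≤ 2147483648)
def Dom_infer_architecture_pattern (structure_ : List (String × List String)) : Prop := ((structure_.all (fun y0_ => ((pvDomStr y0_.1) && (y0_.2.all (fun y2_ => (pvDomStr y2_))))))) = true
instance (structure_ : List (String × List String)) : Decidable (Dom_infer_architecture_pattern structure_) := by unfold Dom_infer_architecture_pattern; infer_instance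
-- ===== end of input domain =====

-- One honest line: B makes a single pass over source_dirs, lowercasing each
-- directory once and accumulating four booleans, instead of A's four separate
-- any()-scans; the message list is then built from the flags in the fixed order.

-- ===== PORT A =====
def infer_architecture_pattern (structure_ : List (String × List String)) : String :=
  let source_dirs := (PySem.Dict.mk structure_).getD "source_dirs" []
  let patterns : List String := []
  let patterns := if source_dirs.any (fun d => PySem.Str.isIn "model" (PySem.Str.lower d)) then
      patterns ++ ["Likely uses MVC or layered architecture"] else patterns
  let patterns := if source_dirs.any (fun d => PySem.Str.isIn "controller" (PySem.Str.lower d)) then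
      patterns ++ ["Detected Controller layer"] else patterns
  let patterns := if source_dirs.any (fun d => PySem.Str.isIn "service" (PySem.Str.lower d)) then
      patterns ++ ["Detected Service layer"] else patterns
  let patterns := if source_dirs.any (fun d =>
      PySem.Str.isIn "repository" (PySem.Str.lower d) || PySem.Str.isIn "dao" (PySem.Str.lower d)) then
      patterns ++ ["Detected Repository/DAO layer"] else patterns
  if patterns.isEmpty then
    "- [To be analyzed] Please add architecture patterns based on code structure"
  else
    PySem.Str.join "\n" (patterns.map (fun p => "- " ++ p))

-- ===== PORT B =====
def pvFlagsStep (f : Bool × Bool × Bool × Bool) (d : String) : Bool × Bool × Bool × Bool :=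
  let dl := PySem.Str.lower d
  (f.1 || PySem.Str.isIn "model" dl,
   f.2.1 || PySem.Str.isIn "controller" dl,
   f.2.2.1 || PySem.Str.isIn "service" dl,
   f.2.2.2 || (PySem.Str.isIn "repository" dl || PySem.Str.isIn "dao" dl))

def infer_architecture_pattern_alt (structure_ : List (String × List String)) : String :=
  let dirs := (PySem.Dict.mk structure_).getD "source_dirs" []
  let flags := dirs.foldl pvFlagsStep (false, false, false, false)
  let msgs : List String :=
    (if flags.1 then ["- Likely uses MVC or layered architecture"] else []) ++
    (if flags.2.1 then ["- Detected Controller layer"] else []) ++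
    (if flags.2.2.1 then ["- Detected Service layer"] else []) ++
    (if flags.2.2.2 then ["- Detected Repository/DAO layer"] else [])
  if msgs.isEmpty then
    "- [To be analyzed] Please add architecture patterns based on code structure"
  else
    PySem.Str.join "\n" msgs

-- ===== PRECONDITION & SPEC =====
def Spec_infer_architecture_pattern (structure_ : List (String × List String)) (out : String) : Prop := out = infer_architecture_pattern_alt structure_
instance (structure_ : List (String × List String)) (out : String) : Decidable (Spec_infer_architecture_pattern structure_ out) := by unfold Spec_infer_architecture_pattern; infer_instance

-- ===== CLAIM (what is proved, stated in full; the proofs are below) =====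
def Claim_equal_infer_architecture_pattern : Prop := ∀ (structure_ : List (String × List String)), Dom_infer_architecture_pattern structure_ → Spec_infer_architecture_pattern structure_ (infer_architecture_pattern structure_)

-- ===== LEMMAS AND PROOFS =====

-- B's single fold computes exactly the four any()-scans of A.
theorem pvFlags_eq (dirs : List String) (a b c r : Bool) :
    dirs.foldl pvFlagsStep (a, b, c, r) =
      (a || dirs.any (fun d => PySem.Str.isIn "model" (PySem.Str.lower d)),
       b || dirs.any (fun d => PySem.Str.isIn "controller" (PySem.Str.lower d)),
       c || dirs.any (fun d => PySem.Str.isIn "service" (PySem.Str.lower d)),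
       r || dirs.any (fun d =>
         PySem.Str.isIn "repository" (PySem.Str.lower d) || PySem.Str.isIn "dao" (PySem.Str.lower d))) := by
  induction dirs generalizing a b c r with
  | nil => simp
  | cons d rest ih =>
    simp only [List.foldl_cons, List.any_cons, pvFlagsStep, ih, Bool.or_assoc]

-- ===== VERDICT (by name: the statement is the Claim_ definition above) =====
theorem infer_architecture_pattern_spec : Claim_equal_infer_architecture_pattern := by
  intro structure_ _
  unfold Spec_infer_architecture_pattern infer_architecture_pattern infer_architecture_pattern_alt
  simp only [pvFlags_eq, Bool.false_or]
  cases hm : ((PySem.Dict.mk structure_).getD "source_dirs" []).any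
      (fun d => PySem.Str.isIn "model" (PySem.Str.lower d)) <;>
  cases hc : ((PySem.Dict.mk structure_).getD "source_dirs" []).any
      (fun d => PySem.Str.isIn "controller" (PySem.Str.lower d)) <;>
  cases hs : ((PySem.Dict.mk structure_).getD "source_dirs" []).any
      (fun d => PySem.Str.isIn "service" (PySem.Str.lower d)) <;>
  cases hr : ((PySem.Dict.mk structure_).getD "source_dirs" []).any
      (fun d => PySem.Str.isIn "repository" (PySem.Str.lower d) || PySem.Str.isIn "dao" (PySem.Str.lower d)) <;>
  simp
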